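-- pv_equiv track=rewrite | github.com/kanatakayasu/apriori-window | paper/K-pharmacoepidemiology/implementation/python/pharma_dense_miner.py | compute_item_transaction_map
-- ===== SOURCE A (Python) =====
-- from typing import Dict, List, Optional, Sequence, Tuple
--
-- def compute_item_transaction_map(
--     transactions: List[List[int]],
-- ) -> Dict[int, List[int]]:
--     """Build item -> sorted transaction ID list mapping."""
--     item_map: Dict[int, List[int]] = {}
--     for t_id, txn in enumerate(transactions):
--         seen: set = set()
--         for item in txn:
--             if item not in seen:
--                 seen.add(item)
--                 item_map.setdefault(item, []).append(t_id)
--     return item_map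
-- ===== SOURCE B (Python) =====
-- def compute_item_transaction_map(transactions):
--     item_sets = {}
--     for t_id, txn in enumerate(transactions):
--         for item in txn:
--             item_sets.setdefault(item, set()).add(t_id)
--     return {item: sorted(tids) for item, tids in item_sets.items()}
-- ===== Notes on version B (the rewrite author's own statement) =====
-- stated objective: alternative
-- what changed: B drops A's per-transaction 'seen' set and incremental append-to-sorted-list dict: it groups transaction ids into a dict of sets via idempotent setdefault(item, set()).add(t_id) and sorts each id set once at the end.
import Mathlib
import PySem

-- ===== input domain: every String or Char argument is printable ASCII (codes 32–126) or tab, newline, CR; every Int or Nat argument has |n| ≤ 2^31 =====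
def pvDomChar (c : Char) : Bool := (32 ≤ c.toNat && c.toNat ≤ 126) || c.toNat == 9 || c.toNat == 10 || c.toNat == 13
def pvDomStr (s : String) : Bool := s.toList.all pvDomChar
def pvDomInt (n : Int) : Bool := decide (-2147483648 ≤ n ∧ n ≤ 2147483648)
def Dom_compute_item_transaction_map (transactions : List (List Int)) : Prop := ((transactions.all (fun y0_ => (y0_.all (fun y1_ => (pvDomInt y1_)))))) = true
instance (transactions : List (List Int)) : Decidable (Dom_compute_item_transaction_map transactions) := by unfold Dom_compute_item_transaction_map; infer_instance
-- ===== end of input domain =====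

-- B replaces A's per-transaction 'seen' set and incremental sorted-list appends by a dict of
-- id-SETS built with idempotent set-adds, sorted once at the end (objective: alternative).

-- ===== PORT A =====
-- inner loop body: 'if item not in seen: seen.add(item); item_map.setdefault(item, []).append(t_id)'
def pvAStep (t : Int) (st : PySem.Set Int × PySem.Dict Int (List Int)) (item : Int) :
    PySem.Set Int × PySem.Dict Int (List Int) :=
  if PySem.Set.contains st.1 item then st
  else (PySem.Set.add st.1 item,
        PySem.Dict.insert st.2 item (PySem.Dict.getD st.2 item [] ++ [t]))

-- one transaction of A: fresh 'seen', fold over the items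
def pvATxn (item_map : PySem.Dict Int (List Int)) (p : Int × List Int) :
    PySem.Dict Int (List Int) :=
  (p.2.foldl (pvAStep p.1) (PySem.Set.empty, item_map)).2

def compute_item_transaction_map (transactions : List (List Int)) : List (Int × List Int) :=
  ((PySem.List.enumerate transactions).foldl pvATxn PySem.Dict.empty).items

-- ===== PORT B =====
-- inner loop body: 'item_sets.setdefault(item, set()).add(t_id)'
def pvBStep (t : Int) (d : PySem.Dict Int (PySem.Set Int)) (item : Int) :
    PySem.Dict Int (PySem.Set Int) :=
  PySem.Dict.insert d item (PySem.Set.add (PySem.Dict.getD d item PySem.Set.empty) t)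

def pvBTxn (d : PySem.Dict Int (PySem.Set Int)) (p : Int × List Int) :
    PySem.Dict Int (PySem.Set Int) :=
  p.2.foldl (pvBStep p.1) d

def compute_item_transaction_map_alt (transactions : List (List Int)) : List (Int × List Int) :=
  (((PySem.List.enumerate transactions).foldl pvBTxn PySem.Dict.empty).items).map
    (fun kv => (kv.1, PySem.List.sorted kv.2 (fun x => x) false))

-- ===== PRECONDITION & SPEC =====
def Spec_compute_item_transaction_map (transactions : List (List Int)) (out : List (Int × List Int)) : Prop := out = compute_item_transaction_map_alt transactions
instance (transactions : List (List Int)) (out : List (Int × List Int)) : Decidable (Spec_compute_item_transaction_map transactions out) := by unfold Spec_compute_item_transaction_map; infer_instance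

-- ===== CLAIM (what is proved, stated in full; the proofs are below) =====
def Claim_equal_compute_item_transaction_map : Prop := ∀ (transactions : List (List Int)), Dom_compute_item_transaction_map transactions → Spec_compute_item_transaction_map transactions (compute_item_transaction_map transactions)

-- ===== LEMMAS AND PROOFS =====

-- pointwise invariant during one transaction t: each stored id-list is strictly increasing,
-- bounded by t, and contains t exactly for the items already seen in this transaction
def pvInvP (t : Int) (seen : PySem.Set Int) (d : PySem.Dict Int (List Int)) (k : Int) : Prop :=
  (PySem.Dict.getD d k []).Pairwise (· < ·) ∧
  (∀ x ∈ PySem.Dict.getD d k [], x ≤ t) ∧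
  (t ∈ PySem.Dict.getD d k [] ↔ k ∈ seen)

-- invariant between transactions: nodup keys, strictly increasing values, all ids < t
def pvInvO (t : Int) (d : PySem.Dict Int (List Int)) : Prop :=
  (PySem.Dict.keys d).Nodup ∧
  ∀ k, (PySem.Dict.getD d k []).Pairwise (· < ·) ∧ ∀ x ∈ PySem.Dict.getD d k [], x < t

lemma pvInvO_mono {t u : Int} {d : PySem.Dict Int (List Int)} (h : pvInvO t d) (htu : t ≤ u) :
    pvInvO u d := by
  obtain ⟨hn, hk⟩ := h
  exact ⟨hn, fun k => ⟨(hk k).1, fun x hx => lt_of_lt_of_le ((hk k).2 x hx) htu⟩⟩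

lemma pv_insert_self {d : PySem.Dict Int (List Int)} {k : Int} {v : List Int}
    (hn : (PySem.Dict.keys d).Nodup) (h : PySem.Dict.get? d k = some v) :
    PySem.Dict.insert d k v = d := by
  have hc : PySem.Dict.contains d k = true := by
    rw [PySem.Dict.contains_eq_isSome_get? d k, h]; rfl
  have hitems : (PySem.Dict.insert d k v).items =
      d.items.map (fun p => if p.1 == k then (k, v) else p) :=
    PySem.Dict.items_insert_of_contains d v hc
  have hmap : d.items.map (fun p => if p.1 == k then (k, v) else p) = d.items := by
    have hcongr : ∀ p ∈ d.items, (if p.1 == k then (k, v) else p) = p := by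
      intro p hp
      by_cases hpk : p.1 = k
      · have hpmem : (k, p.2) ∈ d.items := by rw [← hpk]; simpa using hp
        have := PySem.Dict.get?_of_mem_items d hpmem hn
        rw [h] at this
        simp only [hpk, beq_self_eq_true, if_true]
        exact Prod.ext hpk.symm (by injection this)
      · simp [hpk]
    calc d.items.map (fun p => if p.1 == k then (k, v) else p) = d.items.map id :=
          List.map_congr_left hcongr
      _ = d.items := List.map_id d.items
  have : (PySem.Dict.insert d k v).items = d.items := hitems.trans hmap
  cases d; cases hd' : PySem.Dict.insert _ k v
  simp_all

lemma pvInner (t : Int) (txn : List Int) : ∀ (seen : PySem.Set Int)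
    (d : PySem.Dict Int (List Int)), (PySem.Dict.keys d).Nodup → (∀ k, pvInvP t seen d k) →
    (txn.foldl (pvAStep t) (seen, d)).2 = txn.foldl (pvBStep t) d ∧
    ((txn.foldl (pvAStep t) (seen, d)).2).keys.Nodup ∧
    ∀ k, pvInvP t (txn.foldl (pvAStep t) (seen, d)).1 (txn.foldl (pvAStep t) (seen, d)).2 k := by
  induction txn with
  | nil => exact fun seen d hn hInv => ⟨rfl, hn, hInv⟩
  | cons item rest ih =>
    intro seen d hn hInv
    simp only [List.foldl_cons]
    by_cases hm : item ∈ seen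
    · have hcont : PySem.Set.contains seen item = true := (PySem.Set.contains_iff seen item).mpr hm
      have hstepA : pvAStep t (seen, d) item = (seen, d) := by
        unfold pvAStep; rw [hcont]; simp
      have ht : t ∈ PySem.Dict.getD d item [] := (hInv item).2.2.mpr hm
      have hdc : PySem.Dict.contains d item = true := by
        by_contra hcf
        have : PySem.Dict.getD d item [] = [] :=
          PySem.Dict.getD_of_not_contains d [] (Bool.not_eq_true _ ▸ hcf)
        rw [this] at ht; exact List.not_mem_nil ht
      obtain ⟨v, hv⟩ : ∃ v, PySem.Dict.get? d item = some v := by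
        have := PySem.Dict.contains_eq_isSome_get? d item
        rw [hdc] at this
        exact Option.isSome_iff_exists.mp this.symm
      have hgetD : PySem.Dict.getD d item [] = v := PySem.Dict.getD_of_get?_eq_some d [] hv
      have hstepB : pvBStep t d item = d := by
        unfold pvBStep
        have hadd : PySem.Set.add (PySem.Dict.getD d item PySem.Set.empty) t =
            PySem.Dict.getD d item [] := PySem.Set.add_of_mem ht
        rw [hadd, hgetD]
        exact pv_insert_self hn hv
      rw [hstepA, hstepB]
      exact ih seen d hn hInv
    · have hcont : PySem.Set.contains seen item = false := by
        by_contra hcf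
        exact hm ((PySem.Set.contains_iff seen item).mp (Bool.not_eq_false _ ▸ hcf))
      have htno : t ∉ PySem.Dict.getD d item [] := fun h => hm ((hInv item).2.2.mp h)
      have hstepA : pvAStep t (seen, d) item =
          (PySem.Set.add seen item,
           PySem.Dict.insert d item (PySem.Dict.getD d item [] ++ [t])) := by
        unfold pvAStep; rw [hcont]; simp
      have hstepB : pvBStep t d item =
          PySem.Dict.insert d item (PySem.Dict.getD d item [] ++ [t]) := by
        unfold pvBStep
        rw [show (PySem.Set.empty : PySem.Set Int) = ([] : List Int) from rfl,
          PySem.Set.add_of_not_mem htno]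
      rw [hstepA, hstepB]
      apply ih
      · exact PySem.Dict.nodup_keys_insert d item _ hn
      · intro k
        unfold pvInvP
        rw [PySem.Dict.getD_insert d item k _ []]
        by_cases hk : k = item
        · simp only [hk, if_true]
          refine ⟨?_, ?_, ?_⟩
          · rw [List.pairwise_append]
            refine ⟨(hInv item).1, List.pairwise_singleton _ _, ?_⟩
            intro x hx y hy
            rw [List.mem_singleton] at hy
            subst hy
            exact lt_of_le_of_ne ((hInv item).2.1 x hx) (fun hxt => htno (hxt ▸ hx))
          · intro x hx
            rcases List.mem_append.mp hx with hx | hx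
            · exact (hInv item).2.1 x hx
            · rw [List.mem_singleton] at hx; exact le_of_eq hx
          · constructor
            · intro _; exact PySem.Set.mem_add seen item item |>.mpr (Or.inr rfl)
            · intro _; exact List.mem_append.mpr (Or.inr (List.mem_singleton.mpr rfl))
        · simp only [hk, if_false]
          refine ⟨(hInv k).1, (hInv k).2.1, ?_⟩
          rw [(hInv k).2.2, PySem.Set.mem_add seen item k]
          exact ⟨Or.inl, fun h => h.resolve_right hk⟩

lemma pvOuter (ts : List (List Int)) : ∀ (t : Int) (d : PySem.Dict Int (List Int)),
    pvInvO t d →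
    (PySem.List.enumerate ts t).foldl pvATxn d = (PySem.List.enumerate ts t).foldl pvBTxn d ∧
    ∀ u, t + ts.length ≤ u → pvInvO u ((PySem.List.enumerate ts t).foldl pvATxn d) := by
  induction ts with
  | nil =>
    intro t d hO
    rw [PySem.List.enumerate_nil t]
    exact ⟨rfl, fun u hu => pvInvO_mono hO (by simpa using hu)⟩
  | cons x xs ih =>
    intro t d hO
    rw [PySem.List.enumerate_cons x xs t]
    simp only [List.foldl_cons]
    have hInvP : ∀ k, pvInvP t PySem.Set.empty d k := by
      intro k
      refine ⟨(hO.2 k).1, fun y hy => le_of_lt ((hO.2 k).2 y hy), ?_⟩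
      constructor
      · intro h; exact absurd rfl (ne_of_lt ((hO.2 k).2 t h))
      · intro h; exact absurd h (List.not_mem_nil)
    obtain ⟨heq, hn, hInv'⟩ := pvInner t x PySem.Set.empty d hO.1 hInvP
    have hA : pvATxn d (t, x) = pvBTxn d (t, x) := heq
    have hO' : pvInvO (t + 1) (pvATxn d (t, x)) := by
      refine ⟨hn, fun k => ⟨(hInv' k).1, fun y hy => ?_⟩⟩
      exact lt_of_le_of_lt ((hInv' k).2.1 y hy) (by omega)
    obtain ⟨heq2, hbound⟩ := ih (t + 1) (pvATxn d (t, x)) hO'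
    refine ⟨by rw [← hA]; exact heq2, fun u hu => ?_⟩
    exact hbound u (by simp only [List.length_cons] at hu; push_cast at hu ⊢; omega)

-- ===== VERDICT (by name: the statement is the Claim_ definition above) =====
theorem compute_item_transaction_map_spec : Claim_equal_compute_item_transaction_map := by
  intro ts _
  unfold Spec_compute_item_transaction_map
  unfold compute_item_transaction_map compute_item_transaction_map_alt
  have h0 : pvInvO 0 (PySem.Dict.empty : PySem.Dict Int (List Int)) := by
    constructor
    · simp [pysem]
    · intro k; simp [pysem]
  obtain ⟨heq, hb⟩ := pvOuter ts 0 PySem.Dict.empty h0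
  rw [← heq]
  have hO := hb (ts.length) (by simp)
  set D := (PySem.List.enumerate ts 0).foldl pvATxn PySem.Dict.empty with hD
  have hcongr : ∀ kv ∈ D.items,
      (fun kv : Int × List Int => (kv.1, PySem.List.sorted kv.2 (fun x => x) false)) kv = kv := by
    intro kv hkv
    have hget : PySem.Dict.getD D kv.1 [] = kv.2 :=
      PySem.Dict.getD_of_mem_items D (by simpa using hkv) hO.1 []
    have hpair : kv.2.Pairwise (· < ·) := hget ▸ (hO.2 kv.1).1
    have hs : PySem.List.sorted kv.2 (fun x => x) false = kv.2 :=
      PySem.List.sorted_eq_of_perm_of_pairwise_lt kv.2 kv.2 (fun x => x) (List.Perm.refl kv.2) hpair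
    simp [hs]
  calc D.items = D.items.map id := (List.map_id D.items).symm
    _ = D.items.map (fun kv : Int × List Int => (kv.1, PySem.List.sorted kv.2 (fun x => x) false)) :=
        (List.map_congr_left hcongr).symm
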